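-- pv_equiv track=rewrite | github.com/YuCheng21/nkust-genetic-algorithm | Quiz/Quiz_3.py | quiz_3
-- ===== SOURCE A (Python) =====
-- def quiz_3(array):
--     length = len(array)
--     if length == 0:
--         return False
--     # 紀錄可以走最大步數
--     maximum = 0
--     # 遞迴陣列長度
--     for i in range(length):
--         # 可以走的最大步數 < 當前的位置 = 無法走到最後
--         if maximum < i:
--             return False
--         # 可以走的最大步數 > 最後一個位置 = 可以走到最後
--         if maximum > length:
--             return True
--         # 比較[可以走的最大步數]與[當前 Index 可以走的步數 + index]的最大的數字，即為可以走的最大步數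
--         maximum = max(maximum, array[i] + i)
--     # 如果走到最後沒有回傳 False，代表這個陣列可以走到最後
--     return True
-- ===== SOURCE B (Python) =====
-- def quiz_3(array):
--     last = len(array) - 1
--     for i in range(len(array) - 2, -1, -1):
--         if array[i] + i >= last:
--             last = i
--     return last == 0
-- ===== Notes on version B (the rewrite author's own statement) =====
-- stated objective: idiomatic
-- what changed: Replaces A's forward furthest-reach scan (with two early returns) by the backward greedy: scan right-to-left maintaining the leftmost index from which the end is reachable and return whether it is 0.
import Mathlib
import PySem

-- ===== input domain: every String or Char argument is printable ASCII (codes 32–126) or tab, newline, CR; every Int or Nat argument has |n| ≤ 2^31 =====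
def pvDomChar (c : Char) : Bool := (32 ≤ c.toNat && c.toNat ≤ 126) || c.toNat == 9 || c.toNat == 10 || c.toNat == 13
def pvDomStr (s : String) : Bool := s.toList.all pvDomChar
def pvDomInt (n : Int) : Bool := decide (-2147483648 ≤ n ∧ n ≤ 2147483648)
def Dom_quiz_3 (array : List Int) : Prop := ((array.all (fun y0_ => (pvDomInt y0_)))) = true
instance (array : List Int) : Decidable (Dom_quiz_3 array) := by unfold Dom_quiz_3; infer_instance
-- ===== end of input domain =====

-- B replaces A's forward furthest-reach scan by the backward greedy (leftmost index that reaches the end); same O(n) cost, more idiomatic.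

-- ===== PORT A =====
-- forward loop: i runs over range(length); i is always in [0, length), so array[i] = (pyGet? array i).getD 0 exactly
def quiz3Loop (array : List Int) (length : Int) : Nat → Nat → Int → Bool
  | 0, _, _ => true
  | fuel+1, i, maximum =>
    if maximum < (i : Int) then false
    else if maximum > length then true
    else quiz3Loop array length fuel (i+1) (max maximum ((PySem.List.pyGet? array (i : Int)).getD 0 + (i : Int)))

def quiz_3 (array : List Int) : Bool :=
  let length : Int := array.length
  if length = 0 then false
  else quiz3Loop array length array.length 0 0

-- ===== PORT B =====
-- backward loop of Source B: `for i in range(len-2, -1, -1)` as downward recursion, index = counter-1;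
-- i is always in [0, length), so array[i] = (pyGet? array i).getD 0 exactly
def quiz3AltLoop (array : List Int) : Nat → Int → Int
  | 0, last => last
  | k+1, last =>
      quiz3AltLoop array k
        (if (PySem.List.pyGet? array (k : Int)).getD 0 + (k : Int) ≥ last then (k : Int) else last)

def quiz_3_alt (array : List Int) : Bool :=
  let last := quiz3AltLoop array (array.length - 1) ((array.length : Int) - 1)
  decide (last = 0)

-- ===== PRECONDITION & SPEC =====
def Spec_quiz_3 (array : List Int) (out : Bool) : Prop := out = quiz_3_alt array
instance (array : List Int) (out : Bool) : Decidable (Spec_quiz_3 array out) := by unfold Spec_quiz_3; infer_instance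

-- ===== CLAIM (what is proved, stated in full; the proofs are below) =====
def Claim_equal_quiz_3 : Prop := ∀ (array : List Int), Dom_quiz_3 array → Spec_quiz_3 array (quiz_3 array)

-- ===== LEMMAS AND PROOFS =====

-- f j = array[j] + j, the "reach" value at index j
def pvF (a : List Int) (j : Nat) : Int := (PySem.List.pyGet? a (j : Int)).getD 0 + (j : Int)

-- the coverage condition both algorithms decide (for nonempty a)
def pvCnd (a : List Int) : Prop := ∀ k : Nat, 0 < k → k < a.length → ∃ j < k, (k : Int) ≤ pvF a j

-- prefix maximum maintained by A's loop
def pvM (a : List Int) : Nat → Int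
  | 0 => 0
  | k+1 => max (pvM a k) (pvF a k)

theorem pvM_mono (a : List Int) {j k : Nat} (h : j ≤ k) : pvM a j ≤ pvM a k := by
  induction k with
  | zero => simp [Nat.le_zero.mp h]
  | succ k ih =>
    rcases Nat.lt_or_ge j (k+1) with h' | h'
    · exact le_trans (ih (Nat.lt_succ_iff.mp h')) (le_max_left _ _)
    · have : j = k+1 := le_antisymm h h'
      simp [this]

theorem pvM_char (a : List Int) (c : Int) (k : Nat) :
    c ≤ pvM a k ↔ c ≤ 0 ∨ ∃ j < k, c ≤ pvF a j := by
  induction k with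
  | zero => simp [pvM]
  | succ k ih =>
    simp only [pvM, le_max_iff, ih]
    constructor
    · rintro ((h | ⟨j, hj, hfj⟩) | h)
      · exact Or.inl h
      · exact Or.inr ⟨j, Nat.lt_succ_of_lt hj, hfj⟩
      · exact Or.inr ⟨k, Nat.lt_succ_self _, h⟩
    · rintro (h | ⟨j, hj, hfj⟩)
      · exact Or.inl (Or.inl h)
      · rcases Nat.lt_succ_iff_lt_or_eq.mp hj with h' | rfl
        · exact Or.inl (Or.inr ⟨j, h', hfj⟩)
        · exact Or.inr hfj

theorem fwd_eq (a : List Int) : ∀ (fuel i : Nat), i + fuel = a.length →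
    (quiz3Loop a (a.length : Int) fuel i (pvM a i) = true ↔
      ∀ k, i ≤ k → k < a.length → (k : Int) ≤ pvM a k) := by
  intro fuel
  induction fuel with
  | zero =>
    intro i hi
    simp only [quiz3Loop]
    constructor
    · intro _ k hk hk'; omega
    · intro _; trivial
  | succ fuel ih =>
    intro i hi
    simp only [quiz3Loop]
    by_cases h1 : pvM a i < (i : Int)
    · simp only [h1, if_true]
      constructor
      · intro h; exact absurd h (by simp)
      · intro h
        exact absurd (h i le_rfl (by omega)) (by omega)
    · rw [if_neg h1]
      by_cases h2 : pvM a i > (a.length : Int)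
      · simp only [h2, if_true]
        constructor
        · intro _ k hk hk'
          have := pvM_mono a hk
          have : (k : Int) < (a.length : Int) := by exact_mod_cast hk'
          omega
        · intro _; trivial
      · rw [if_neg h2]
        have hM : max (pvM a i) ((PySem.List.pyGet? a (i : Int)).getD 0 + (i : Int)) = pvM a (i+1) := by
          simp [pvM, pvF]
        rw [hM, ih (i+1) (by omega)]
        constructor
        · intro h k hk hk'
          rcases Nat.lt_or_ge i k with h' | h'
          · exact h k h' hk'
          · have : k = i := by omega
            subst this; omega
        · intro h k hk hk'; exact h k (by omega) hk'

theorem fwd_char (a : List Int) :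
    quiz_3 a = true ↔ 0 < a.length ∧ pvCnd a := by
  unfold quiz_3
  by_cases hn : a.length = 0
  · simp [hn]
  · have h0 : ¬ ((a.length : Int) = 0) := by exact_mod_cast hn
    rw [if_neg h0]
    have := fwd_eq a a.length 0 (by omega)
    have hM0 : pvM a 0 = 0 := rfl
    rw [hM0] at this
    rw [this]
    constructor
    · intro h
      refine ⟨by omega, ?_⟩
      intro k hk hk'
      have := h k (Nat.zero_le _) hk'
      rcases (pvM_char a (k : Int) k).mp this with h' | h'
      · omega
      · exact h'
    · rintro ⟨_, hC⟩ k _ hk'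
      rcases Nat.eq_zero_or_pos k with rfl | hk0
      · simp [pvM]
      · exact (pvM_char a (k : Int) k).mpr (Or.inr (hC k hk0 hk'))

-- the backward greedy "last" value after processing indices ≥ k (as a function of k)
def pvBwd (a : List Int) : Nat → Int
  | 0 => (a.length : Int) - 1
  | m+1 => if pvF a (a.length - 2 - m) ≥ pvBwd a m then ((a.length - 2 - m : Nat) : Int) else pvBwd a m

def pvG (a : List Int) (k : Nat) : Int := pvBwd a (a.length - 1 - k)

theorem pvG_rec (a : List Int) (k : Nat) (hk : k + 1 ≤ a.length - 1) :
    pvG a k = if pvF a k ≥ pvG a (k+1) then (k : Int) else pvG a (k+1) := by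
  unfold pvG
  have h1 : a.length - 1 - k = (a.length - 1 - (k+1)) + 1 := by omega
  rw [h1]
  have h2 : a.length - 2 - (a.length - 1 - (k+1)) = k := by omega
  simp only [pvBwd, h2]

theorem pvG_bounds (a : List Int) (hn : 0 < a.length) :
    ∀ m k, a.length - 1 - k = m → k ≤ a.length - 1 →
      (k : Int) ≤ pvG a k ∧ pvG a k ≤ (a.length : Int) - 1 := by
  intro m
  induction m with
  | zero =>
    intro k hm hk
    have hk' : k = a.length - 1 := by omega
    subst hk'
    unfold pvG
    simp only [Nat.sub_self, pvBwd]
    constructor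
    · omega
    · exact le_rfl
  | succ m ih =>
    intro k hm hk
    have hk1 : k + 1 ≤ a.length - 1 := by omega
    have ihk := ih (k+1) (by omega) hk1
    rw [pvG_rec a k hk1]
    by_cases h : pvF a k ≥ pvG a (k+1)
    · rw [if_pos h]
      constructor
      · exact le_rfl
      · omega
    · rw [if_neg h]
      constructor
      · have : ((k:Nat) : Int) + 1 ≤ pvG a (k+1) := by
          have := ihk.1; push_cast at this ⊢; omega
        omega
      · exact ihk.2

theorem alt_g (a : List Int) : ∀ k, k ≤ a.length - 1 →
    quiz3AltLoop a k (pvG a k) = pvG a 0 := by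
  intro k
  induction k with
  | zero => intro _; rfl
  | succ k ih =>
    intro hk
    have hk1 : k + 1 ≤ a.length - 1 := hk
    have hrec := pvG_rec a k hk1
    show quiz3AltLoop a k
        (if pvF a k ≥ pvG a (k+1) then (k : Int) else pvG a (k+1)) = pvG a 0
    rw [← hrec]
    exact ih (by omega)

theorem bwd_char (a : List Int) :
    quiz_3_alt a = true ↔ 0 < a.length ∧ pvG a 0 = 0 := by
  unfold quiz_3_alt
  by_cases hn : a.length = 0
  · simp_all [quiz3AltLoop]
  · have h1 : pvG a (a.length - 1) = (a.length : Int) - 1 := by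
      unfold pvG; simp [pvBwd]
    have h2 := alt_g a (a.length - 1) le_rfl
    rw [h1] at h2
    simp only [h2, decide_eq_true_eq]
    constructor
    · intro h; exact ⟨by omega, h⟩
    · intro h; exact h.2

theorem cnd_to_g (a : List Int) (hn : 0 < a.length) (hC : pvCnd a) : pvG a 0 = 0 := by
  by_contra hne
  have hb := pvG_bounds a hn (a.length - 1 - 0) 0 rfl (by omega)
  -- g 0 > 0; the chain g 0 = g 1 = … up to it, with all pvF below it
  have hpos : 0 < pvG a 0 := by omega
  set mI := pvG a 0 with hmI
  have hmn : mI ≤ (a.length : Int) - 1 := hb.2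
  obtain ⟨m, hm⟩ : ∃ m : Nat, (m : Int) = mI := ⟨mI.toNat, Int.toNat_of_nonneg (by omega)⟩
  have hm1 : 1 ≤ m := by omega
  have hmlt : m < a.length := by
    have : (m : Int) ≤ (a.length : Int) - 1 := by omega
    push_cast at this; omega
  have hchain : ∀ k, k ≤ m → pvG a k = mI ∧ (k < m → pvF a k < mI) := by
    intro k
    induction k with
    | zero =>
      intro _
      refine ⟨hmI.symm ▸ rfl, ?_⟩
      intro h0
      have hk1 : 0 + 1 ≤ a.length - 1 := by omega
      have hrec0 := pvG_rec a 0 hk1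
      by_cases hc : pvF a 0 ≥ pvG a (0+1)
      · rw [if_pos hc] at hrec0
        exfalso; omega
      · rw [if_neg hc] at hrec0
        omega
    | succ k ih =>
      intro hk
      have ihk := ih (by omega)
      have hk1 : k + 1 ≤ a.length - 1 := by omega
      have hrec := pvG_rec a k hk1
      by_cases hc : pvF a k ≥ pvG a (k+1)
      · rw [if_pos hc] at hrec
        exfalso
        have heq : (k : Int) = mI := by rw [← hrec, ihk.1]
        have hlt : k < m := by omega
        omega
      · rw [if_neg hc] at hrec
        have hgk1 : pvG a (k+1) = mI := by rw [← hrec, ihk.1]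
        refine ⟨hgk1, ?_⟩
        intro hklt
        have hrec2 := pvG_rec a (k+1) (by omega)
        by_cases hc2 : pvF a (k+1) ≥ pvG a (k+1+1)
        · rw [if_pos hc2] at hrec2
          exfalso
          have heq : ((k:Int) + 1) = mI := by push_cast at hrec2 ⊢; omega
          omega
        · rw [if_neg hc2] at hrec2
          rw [hgk1] at hrec2
          omega
  have hcover := hC m hm1 hmlt
  obtain ⟨j, hj, hfj⟩ := hcover
  have := (hchain j (by omega)).2 (by omega)
  omega

theorem g_to_cnd (a : List Int) (hn : 0 < a.length) (hg : pvG a 0 = 0) : pvCnd a := by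
  have hQ : ∀ i, 1 ≤ i → i ≤ a.length - 1 → ∃ j < i, pvG a i ≤ pvF a j := by
    intro i
    induction i with
    | zero => intro h; omega
    | succ i ih =>
      intro _ hi
      rcases Nat.eq_zero_or_pos i with rfl | hi0
      · -- base: i+1 = 1
        have hrec := pvG_rec a 0 hi
        by_cases hc : pvF a 0 ≥ pvG a (0+1)
        · exact ⟨0, by omega, hc⟩
        · rw [if_neg hc] at hrec
          have hb := (pvG_bounds a hn (a.length - 1 - (0+1)) (0+1) rfl hi).1
          exfalso; omega
      · have hrec := pvG_rec a i hi
        by_cases hc : pvF a i ≥ pvG a (i+1)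
        · exact ⟨i, Nat.lt_succ_self _, hc⟩
        · rw [if_neg hc] at hrec
          obtain ⟨j, hj, hfj⟩ := ih hi0 (by omega)
          exact ⟨j, Nat.lt_succ_of_lt hj, by rw [← hrec]; exact hfj⟩
  intro k hk hk'
  obtain ⟨j, hj, hfj⟩ := hQ k hk (by omega)
  have := (pvG_bounds a hn (a.length - 1 - k) k rfl (by omega)).1
  exact ⟨j, hj, le_trans this hfj⟩

theorem ab_eq (a : List Int) : quiz_3 a = quiz_3_alt a := by
  rw [Bool.eq_iff_iff, fwd_char, bwd_char]
  constructor
  · rintro ⟨hn, hC⟩; exact ⟨hn, cnd_to_g a hn hC⟩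
  · rintro ⟨hn, hg⟩; exact ⟨hn, g_to_cnd a hn hg⟩

-- ===== VERDICT (by name: the statement is the Claim_ definition above) =====
theorem quiz_3_spec : Claim_equal_quiz_3 := by
  intro array _
  unfold Spec_quiz_3
  exact ab_eq array
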